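-- pv_equiv track=rewrite | github.com/arvidn/libtorrent | docs/ips.py | num_ids
-- ===== SOURCE A (Python) =====
-- def num_ids(bits, total_bits):
--
-- 	if total_bits == 32:
-- 		bit_dec = 2
-- 	else:
-- 		bit_dec = 1
--
-- 	num_used = 7;
-- 	ret = 3
--
-- 	while bits > 0:
-- 		ret += min(num_used, bits)
-- 		num_used -= bit_dec
-- 		if num_used < 0: num_used = 0
-- 		bits -= 8
--
-- 	return 1 << ret
-- ===== SOURCE B (Python) =====
-- def num_ids(bits, total_bits):
--     d = 2 if total_bits == 32 else 1
--     if bits <= 0: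
--         return 1 << 3
--     n = (bits + 7) // 8          # number of loop iterations A would do
--     k = min(n, 7 if d == 1 else 4)  # iterations with a positive num_used
--     s = 7 * k - d * k * (k - 1) // 2  # clamped arithmetic series
--     if n <= k:
--         u = 7 - d * (n - 1)
--         r = bits - 8 * (n - 1)   # residual bits in the last iteration
--         s += min(u, r) - u
--     return 1 << (3 + s)
-- ===== Notes on version B (the rewrite author's own statement) =====
-- stated objective: faster
-- what changed: Replaced the per-8-bits accumulation loop with a closed-form O(1) computation: iteration count n=(bits+7)//8, clamped arithmetic series 7k - d*k*(k-1)/2 for the positive num_used terms, plus one residual min for the final iteration.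
import Mathlib
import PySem

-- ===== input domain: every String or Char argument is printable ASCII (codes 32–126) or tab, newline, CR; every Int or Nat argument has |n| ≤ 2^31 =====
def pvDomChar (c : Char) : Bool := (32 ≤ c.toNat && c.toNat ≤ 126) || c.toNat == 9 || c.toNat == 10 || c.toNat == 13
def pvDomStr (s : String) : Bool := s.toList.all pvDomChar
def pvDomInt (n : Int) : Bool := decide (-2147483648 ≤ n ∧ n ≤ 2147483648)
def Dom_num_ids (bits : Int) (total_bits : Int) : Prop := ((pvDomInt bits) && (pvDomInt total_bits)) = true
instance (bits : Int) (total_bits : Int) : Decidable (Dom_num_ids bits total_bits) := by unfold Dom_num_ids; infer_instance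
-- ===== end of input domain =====

-- B replaces A's per-8-bits while loop by a closed-form expression (faster: O(1) vs O(bits)).

-- ===== PORT A =====
-- A's while loop; fuel = bits.toNat (the loop subtracts 8 from bits each round, so
-- bits.toNat steps always suffice; fuel is only a totality device).
def numIdsLoop (fuel : Nat) (bits num_used ret bit_dec : Int) : Int :=
  match fuel with
  | 0 => ret
  | f + 1 =>
      if bits > 0 then
        numIdsLoop f (bits - 8)
          (if num_used - bit_dec < 0 then 0 else num_used - bit_dec)
          (ret + min num_used bits) bit_dec
      else ret

def num_ids (bits : Int) (total_bits : Int) : Int :=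
  let bit_dec : Int := if total_bits = 32 then 2 else 1
  let ret := numIdsLoop bits.toNat bits 7 3 bit_dec
  (1 : Int) <<< ret.toNat

-- ===== PORT B =====
def num_ids_alt (bits : Int) (total_bits : Int) : Int :=
  let d : Int := if total_bits = 32 then 2 else 1
  if bits ≤ 0 then (1 : Int) <<< (3 : Nat)
  else
    let n := PySem.Int.floordiv (bits + 7) 8
    let k := min n (if d = 1 then 7 else 4)
    let s0 := 7 * k - PySem.Int.floordiv (d * k * (k - 1)) 2
    let s := if n ≤ k then
        let u := 7 - d * (n - 1)
        let r := bits - 8 * (n - 1)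
        s0 + (min u r - u)
      else s0
    (1 : Int) <<< (3 + s).toNat

-- ===== PRECONDITION & SPEC =====
def Spec_num_ids (bits : Int) (total_bits : Int) (out : Int) : Prop := out = num_ids_alt bits total_bits
instance (bits : Int) (total_bits : Int) (out : Int) : Decidable (Spec_num_ids bits total_bits out) := by unfold Spec_num_ids; infer_instance

-- ===== CLAIM (what is proved, stated in full; the proofs are below) =====
def Claim_equal_num_ids : Prop := ∀ (bits : Int) (total_bits : Int), Dom_num_ids bits total_bits → Spec_num_ids bits total_bits (num_ids bits total_bits)

-- ===== LEMMAS AND PROOFS =====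

-- Once num_used is 0 the loop only burns bits without changing ret.
theorem numIdsLoop_zero_used (fuel : Nat) : ∀ (bits ret d : Int),
    0 < d → numIdsLoop fuel bits 0 ret d = ret := by
  induction fuel with
  | zero => intro bits ret d _; rfl
  | succ f ih =>
      intro bits ret d hd
      unfold numIdsLoop
      split
      · next hb =>
        have h1 : (if (0 : Int) - d < 0 then (0:Int) else 0 - d) = 0 := by
          rw [if_pos (by omega)]
        have h2 : min (0:Int) bits = 0 := by omega
        rw [h1, h2, add_zero]
        exact ih _ _ _ hd
      · rfl

theorem numIdsLoop_big_d1 (fuel : Nat) (bits ret : Int)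
    (hb : 56 < bits) (hf : 7 ≤ fuel) :
    numIdsLoop fuel bits 7 ret 1 = ret + 28 := by
  obtain ⟨g, rfl⟩ : ∃ g, fuel = g + 7 := ⟨fuel - 7, by omega⟩
  unfold numIdsLoop
  rw [if_pos (by omega : bits > 0)]
  unfold numIdsLoop
  rw [if_pos (by omega : bits - 8 > 0)]
  unfold numIdsLoop
  rw [if_pos (by omega : bits - 8 - 8 > 0)]
  unfold numIdsLoop
  rw [if_pos (by omega : bits - 8 - 8 - 8 > 0)]
  unfold numIdsLoop
  rw [if_pos (by omega : bits - 8 - 8 - 8 - 8 > 0)]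
  unfold numIdsLoop
  rw [if_pos (by omega : bits - 8 - 8 - 8 - 8 - 8 > 0)]
  unfold numIdsLoop
  rw [if_pos (by omega : bits - 8 - 8 - 8 - 8 - 8 - 8 > 0)]
  norm_num
  rw [show min (7:Int) bits = 7 by omega,
      show min (6:Int) (bits - 8) = 6 by omega,
      show min (5:Int) (bits - 8 - 8) = 5 by omega,
      show min (4:Int) (bits - 8 - 8 - 8) = 4 by omega,
      show min (3:Int) (bits - 8 - 8 - 8 - 8) = 3 by omega,
      show min (2:Int) (bits - 8 - 8 - 8 - 8 - 8) = 2 by omega,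
      show min (1:Int) (bits - 8 - 8 - 8 - 8 - 8 - 8) = 1 by omega]
  rw [numIdsLoop_zero_used g _ _ 1 (by omega)]
  ring

theorem numIdsLoop_big_d2 (fuel : Nat) (bits ret : Int)
    (hb : 56 < bits) (hf : 4 ≤ fuel) :
    numIdsLoop fuel bits 7 ret 2 = ret + 16 := by
  obtain ⟨g, rfl⟩ : ∃ g, fuel = g + 4 := ⟨fuel - 4, by omega⟩
  unfold numIdsLoop
  rw [if_pos (by omega : bits > 0)]
  unfold numIdsLoop
  rw [if_pos (by omega : bits - 8 > 0)]
  unfold numIdsLoop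
  rw [if_pos (by omega : bits - 8 - 8 > 0)]
  unfold numIdsLoop
  rw [if_pos (by omega : bits - 8 - 8 - 8 > 0)]
  norm_num
  rw [show min (7:Int) bits = 7 by omega,
      show min (5:Int) (bits - 8) = 5 by omega,
      show min (3:Int) (bits - 8 - 8) = 3 by omega,
      show min (1:Int) (bits - 8 - 8 - 8) = 1 by omega]
  rw [numIdsLoop_zero_used g _ _ 2 (by omega)]
  ring

theorem num_ids_eq_of_big (bits total_bits : Int) (hb : 56 < bits) :
    num_ids bits total_bits = num_ids_alt bits total_bits := by
  have hn : PySem.Int.floordiv (bits + 7) 8 = (bits + 7) / 8 :=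
    PySem.Int.floordiv_eq_ediv_of_pos (by norm_num)
  have hn8 : 8 ≤ (bits + 7) / 8 := by omega
  by_cases ht : total_bits = 32
  · subst ht
    simp only [num_ids, num_ids_alt, reduceIte, hn]
    rw [numIdsLoop_big_d2 bits.toNat bits 3 hb (by omega)]
    rw [if_neg (by omega : ¬ bits ≤ 0)]
    simp only [show (if (2:Int) = 1 then (7:Int) else 4) = 4 from by norm_num]
    rw [show min ((bits+7)/8) (4:Int) = 4 by omega]
    rw [if_neg (by omega : ¬ (bits+7)/8 ≤ (4:Int))]
    decide
  · simp only [num_ids, num_ids_alt, if_neg ht, hn]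
    rw [numIdsLoop_big_d1 bits.toNat bits 3 hb (by omega)]
    rw [if_neg (by omega : ¬ bits ≤ 0)]
    simp only [reduceIte]
    rw [show min ((bits+7)/8) (7:Int) = 7 by omega]
    rw [if_neg (by omega : ¬ (bits+7)/8 ≤ (7:Int))]
    decide

-- ===== VERDICT (by name: the statement is the Claim_ definition above) =====
theorem num_ids_spec : Claim_equal_num_ids := by
  intro bits total_bits _
  unfold Spec_num_ids
  by_cases hbig : 56 < bits
  · exact num_ids_eq_of_big bits total_bits hbig
  · by_cases hpos : 0 < bits
    · have h1 : 1 ≤ bits := hpos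
      have h2 : bits ≤ 56 := by omega
      by_cases ht : total_bits = 32
      · subst ht
        interval_cases bits <;> decide
      · unfold num_ids num_ids_alt
        simp only [if_neg ht]
        interval_cases bits <;> decide
    · unfold num_ids num_ids_alt
      have hz : bits.toNat = 0 := by omega
      rw [hz, if_pos (by omega : bits ≤ 0)]
      simp [numIdsLoop]
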